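-- pv_equiv track=rewrite | github.com/fjpolo/SR-1_SoC | HelperPrograms/OLD/sa_assembler_V1.py | extractOperation
-- ===== SOURCE A (Python) =====
-- def extractOperation(line):
--     op = ""
--     for char in line:
--         if (char != ' ') and (char != '\n'):
--             op = op + char
--         else:
--             break
--     return op
-- ===== SOURCE B (Python) =====
-- def extractOperation(line):
--     sp = line.find(' ')
--     nl = line.find('\n')
--     cut = len(line)
--     if sp != -1:
--         cut = sp
--     if nl != -1 and nl < cut:
--         cut = nl
--     return line[:cut]
-- ===== Notes on version B (the rewrite author's own statement) =====
-- stated objective: simpler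
-- what changed: Replaces the per-character accumulation loop with find() of the first space/newline delimiter and a single slice line[:cut].
import Mathlib
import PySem

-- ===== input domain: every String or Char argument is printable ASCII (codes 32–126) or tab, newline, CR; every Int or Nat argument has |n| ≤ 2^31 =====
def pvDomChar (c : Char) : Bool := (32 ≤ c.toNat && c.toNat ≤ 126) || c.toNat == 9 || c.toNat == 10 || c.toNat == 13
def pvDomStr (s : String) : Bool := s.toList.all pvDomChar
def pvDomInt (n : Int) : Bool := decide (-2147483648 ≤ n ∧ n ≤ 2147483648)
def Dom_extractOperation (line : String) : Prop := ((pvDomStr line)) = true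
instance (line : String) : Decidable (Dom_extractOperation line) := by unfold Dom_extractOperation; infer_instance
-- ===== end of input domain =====

-- B replaces A's per-character accumulation loop with find() of the first ' '/'\n' and one slice (simpler).


-- ===== PORT A =====
-- A's loop: op = ""; for char in line: append the char unless it is ' ' or '\n', else break.
def extractOpLoop (op : List Char) : List Char → List Char
  | [] => op
  | c :: rest => if c ≠ ' ' ∧ c ≠ '\n' then extractOpLoop (op ++ [c]) rest else op

def extractOperation (line : String) : String :=
  String.ofList (extractOpLoop [] line.toList)

-- ===== PORT B =====
def extractOperation_alt (line : String) : String :=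
  let sp := PySem.Str.find line " "
  let nl := PySem.Str.find line "\n"
  let cut0 : Int := PySem.Str.len line
  let cut1 : Int := if sp ≠ -1 then sp else cut0
  let cut2 : Int := if nl ≠ -1 ∧ nl < cut1 then nl else cut1
  PySem.Str.slice line none (some cut2)

-- ===== PRECONDITION & SPEC =====
def Spec_extractOperation (line : String) (out : String) : Prop := out = extractOperation_alt line
instance (line : String) (out : String) : Decidable (Spec_extractOperation line out) := by unfold Spec_extractOperation; infer_instance

-- ===== CLAIM (what is proved, stated in full; the proofs are below) =====
def Claim_equal_extractOperation : Prop := ∀ (line : String), Dom_extractOperation line → Spec_extractOperation line (extractOperation line)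

-- ===== LEMMAS AND PROOFS =====

-- delimiter test used only in the proofs
def pvDelim (c : Char) : Bool := c == ' ' || c == '\n'

-- [d] is a prefix of xs iff xs starts with d
theorem pv_singleton_prefix (d : Char) (xs : List Char) : ([d] <+: xs) ↔ xs.head? = some d := by
  cases xs with
  | nil => simp
  | cons a t =>
    constructor
    · rintro ⟨s, hs⟩
      simp at hs
      simp [hs.1]
    · intro h
      simp at h
      exact ⟨t, by simp [h]⟩

theorem pv_singleton_prefix_drop (d : Char) (l : List Char) (j : Nat) :
    ([d] <+: l.drop j) ↔ l[j]? = some d := by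
  rw [pv_singleton_prefix, List.head?_drop]

-- Chars.find = -1 means the character occurs nowhere
theorem pv_find_neg (l : List Char) (d : Char) (h : PySem.Chars.find l [d] = -1) :
    ∀ j : Nat, l[j]? ≠ some d := by
  intro j hj
  rw [PySem.Chars.find_eq_neg_one_iff] at h
  exact h ((PySem.Chars.isIn_iff_infix [d] l).mp
    ((PySem.Chars.exists_prefix_drop_iff_isIn [d] l).mp ⟨j, (pv_singleton_prefix_drop d l j).mpr hj⟩))

-- Chars.find ≠ -1 points at the first occurrence
theorem pv_find_pos (l : List Char) (d : Char) (h : PySem.Chars.find l [d] ≠ -1) :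
    0 ≤ PySem.Chars.find l [d] ∧
    l[(PySem.Chars.find l [d]).toNat]? = some d ∧
    ∀ i < (PySem.Chars.find l [d]).toNat, l[i]? ≠ some d := by
  have hge : 0 ≤ PySem.Chars.find l [d] := by
    have := PySem.Chars.neg_one_le_find l [d]; omega
  obtain ⟨h1, h2⟩ := PySem.Chars.find_spec hge
  refine ⟨hge, (pv_singleton_prefix_drop d l _).mp h1, ?_⟩
  intro i hi hcontra
  exact h2 i hi ((pv_singleton_prefix_drop d l i).mpr hcontra)

-- A's loop builds exactly the prefix before the first delimiter
theorem pv_loop_eq (l acc : List Char) :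
    extractOpLoop acc l = acc ++ l.take (l.findIdx pvDelim) := by
  induction l generalizing acc with
  | nil => simp [extractOpLoop]
  | cons c rest ih =>
    by_cases hc : c ≠ ' ' ∧ c ≠ '\n'
    · have hq : pvDelim c = false := by
        simp [pvDelim]; exact ⟨hc.1, hc.2⟩
      simp [extractOpLoop, hc, List.findIdx_cons, hq, ih]
    · have hq : pvDelim c = true := by
        simp [pvDelim]; by_cases h1 : c = ' ' <;> simp_all
      simp [extractOpLoop, hc, List.findIdx_cons, hq]

-- B's cut index equals the index of the first delimiter
theorem pv_cut_eq (l : List Char) :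
    (if PySem.Chars.find l ['\n'] ≠ -1 ∧
        PySem.Chars.find l ['\n'] <
          (if PySem.Chars.find l [' '] ≠ -1 then PySem.Chars.find l [' '] else (l.length : Int))
     then PySem.Chars.find l ['\n']
     else (if PySem.Chars.find l [' '] ≠ -1 then PySem.Chars.find l [' '] else (l.length : Int)))
    = (l.findIdx pvDelim : Int) := by
  set n := l.findIdx pvDelim with hn
  have hnlen : n ≤ l.length := List.findIdx_le_length
  have hbefore : ∀ i, i < n → l[i]? ≠ some ' ' ∧ l[i]? ≠ some '\n' := by
    intro i hi
    have hil : i < l.length := lt_of_lt_of_le hi hnlen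
    have h0 := List.not_of_lt_findIdx (p := pvDelim) (xs := l) hi
    simp only [pvDelim, Bool.or_eq_false_iff, beq_eq_false_iff_ne] at h0
    rw [List.getElem?_eq_getElem hil]
    exact ⟨by simpa using h0.1, by simpa using h0.2⟩
  have hlow : ∀ d : Char, (d = ' ' ∨ d = '\n') → PySem.Chars.find l [d] ≠ -1 →
      (n : Int) ≤ PySem.Chars.find l [d] := by
    intro d hdel hd
    obtain ⟨hge, hat, _⟩ := pv_find_pos l d hd
    by_contra hlt
    have htn : (PySem.Chars.find l [d]).toNat < n := by omega
    have hb := hbefore _ htn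
    rcases hdel with h | h <;> subst h
    · exact hb.1 hat
    · exact hb.2 hat
  have hsplb := hlow ' ' (Or.inl rfl)
  have hnllb := hlow '\n' (Or.inr rfl)
  have hspge := PySem.Chars.neg_one_le_find l [' ']
  have hnlge := PySem.Chars.neg_one_le_find l ['\n']
  rcases Nat.lt_or_ge n l.length with hlt | hge
  · have hdel : pvDelim l[n] = true := List.findIdx_getElem (w := hlt)
    have hmem : l[n]? = some l[n] := List.getElem?_eq_getElem hlt
    have hkey : ∀ d : Char, l[n] = d → PySem.Chars.find l [d] = (n : Int) := by
      intro d hd; subst hd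
      have hne : PySem.Chars.find l [l[n]] ≠ -1 := fun hc => pv_find_neg l _ hc n hmem
      obtain ⟨hge0, _, hmin⟩ := pv_find_pos l _ hne
      have h1 := hlow l[n] (by simpa [pvDelim] using hdel) hne
      have h2 : ¬ (n < (PySem.Chars.find l [l[n]]).toNat) := fun hc => hmin n hc hmem
      omega
    have hltI : (n : Int) < (l.length : Int) := by exact_mod_cast hlt
    rcases (by simpa [pvDelim] using hdel : l[n] = ' ' ∨ l[n] = '\n') with h | h
    · have hsp : PySem.Chars.find l [' '] = (n : Int) := hkey ' ' h
      split_ifs <;> omega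
    · have hnl : PySem.Chars.find l ['\n'] = (n : Int) := hkey '\n' h
      have hspgt : PySem.Chars.find l [' '] ≠ -1 → (n : Int) < PySem.Chars.find l [' '] := by
        intro hne
        obtain ⟨hge0, hat, _⟩ := pv_find_pos l ' ' hne
        have h1 := hsplb hne
        rcases lt_or_eq_of_le h1 with h2 | h2
        · exact h2
        · exfalso
          have heq : (PySem.Chars.find l [' ']).toNat = n := by omega
          rw [heq, hmem] at hat
          simp [h] at hat
      split_ifs <;> omega
  · have hnone : ∀ d : Char, (d = ' ' ∨ d = '\n') → PySem.Chars.find l [d] = -1 := by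
      intro d hdel
      by_contra hc
      have hlb := hlow d hdel hc
      obtain ⟨hge0, hat, _⟩ := pv_find_pos l d hc
      have hlen : (PySem.Chars.find l [d]).toNat < l.length := by
        by_contra hb
        rw [List.getElem?_eq_none (by omega)] at hat
        simp at hat
      omega
    have h1 := hnone ' ' (Or.inl rfl)
    have h2 := hnone '\n' (Or.inr rfl)
    have hgeI : (l.length : Int) ≤ (n : Int) := by exact_mod_cast hge
    have hleI : (n : Int) ≤ (l.length : Int) := by exact_mod_cast hnlen
    split_ifs <;> omega

-- ===== VERDICT (by name: the statement is the Claim_ definition above) =====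
theorem extractOperation_spec : Claim_equal_extractOperation := by
  intro line _
  unfold Spec_extractOperation extractOperation extractOperation_alt
  rw [← String.toList_inj]
  simp only [PySem.Str.find_eq, PySem.Str.len_eq]
  have hs : (" " : String).toList = [' '] := by decide
  have hn : ("\n" : String).toList = ['\n'] := by decide
  rw [hs, hn]
  rw [pv_cut_eq line.toList]
  have hslice : (PySem.Str.slice line none (some ((line.toList.findIdx pvDelim : Nat) : Int))).toList
      = PySem.List.slice line.toList none (some ((line.toList.findIdx pvDelim : Nat) : Int)) := by
    simp [PySem.Str.slice]
  rw [hslice, PySem.List.slice_to _ (by positivity)]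
  simp [pv_loop_eq]
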